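-- pv_equiv track=rewrite | github.com/xJeris/packetspy | packetspy/discovery.py | _build_byte_mask
-- ===== SOURCE A (Python) =====
-- def _build_byte_mask(samples, length):
--     """Compare samples byte-by-byte. Returns list of bools: True = fixed."""
--     if len(samples) < 2:
--         # With one sample we can't determine fixed vs variable
--         return [False] * length
--
--     ref = samples[0]
--     mask = [True] * length
--     for s in samples[1:]:
--         for i in range(length):
--             if mask[i] and s[i] != ref[i]:
--                 mask[i] = False
--     return mask
-- ===== SOURCE B (Python) =====
-- def _build_byte_mask(samples, length):
--     """Compare samples byte-by-byte. Returns list of bools: True = fixed."""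
--     if len(samples) < 2:
--         return [False] * length
--     # A byte is fixed iff every pair of CONSECUTIVE samples agrees on it
--     # (equality is transitive, so this equals agreeing with any reference).
--     pair_masks = [[a[i] == b[i] for i in range(length)]
--                   for a, b in zip(samples, samples[1:])]
--     out = [True] * length
--     for pm in pair_masks:
--         out = [x and y for x, y in zip(out, pm)]
--     return out
-- ===== Notes on version B (the rewrite author's own statement) =====
-- stated objective: alternative
-- what changed: B replaces A's reference-vs-all conditional narrowing of one mutable mask by a chain of full equality masks between consecutive samples, combined by elementwise AND; correct because equality is transitive.
-- outside the precondition, e.g. on _build_byte_mask(['a', 'b', ''], 1): A returns [False], B raises IndexError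
import Mathlib
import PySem

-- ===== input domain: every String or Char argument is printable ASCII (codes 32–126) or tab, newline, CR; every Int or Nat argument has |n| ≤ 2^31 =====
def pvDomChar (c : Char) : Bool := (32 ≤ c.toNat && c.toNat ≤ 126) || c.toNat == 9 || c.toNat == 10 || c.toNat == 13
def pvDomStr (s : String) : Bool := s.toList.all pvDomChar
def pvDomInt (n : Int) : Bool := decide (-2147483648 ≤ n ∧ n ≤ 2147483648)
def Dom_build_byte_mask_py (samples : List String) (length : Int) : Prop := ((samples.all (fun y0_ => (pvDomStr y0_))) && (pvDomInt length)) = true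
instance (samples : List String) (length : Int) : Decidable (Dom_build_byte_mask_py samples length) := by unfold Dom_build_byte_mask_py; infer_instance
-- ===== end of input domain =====

-- B replaces A's reference-vs-all narrowing of one mutable mask by a chain of full equality
-- masks between consecutive samples combined by elementwise AND (alternative algorithm,
-- correct by transitivity of equality); equal return value on all of Pre_.

-- ===== PORT A =====
-- Python locals ref = samples[0] and the mutable mask are inlined / threaded through the folds.
def build_byte_mask_py (samples : List String) (length : Int) : List Bool :=
  if samples.length < 2 then
    List.replicate length.toNat false        -- [False] * length (negative length → [])
  else
    (samples.drop 1).foldl (fun mask s =>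
      (PySem.List.pyRange 0 length 1).foldl (fun m i =>
        if PySem.List.pyGetD m i false = true
            ∧ ¬ (PySem.List.pyGetD s.toList i ' '
                  = PySem.List.pyGetD (PySem.List.pyGetD samples 0 "").toList i ' ')
        then PySem.List.pySetD m i false
        else m) mask)
      (List.replicate length.toNat true)

-- ===== PORT B =====
def build_byte_mask_py_alt (samples : List String) (length : Int) : List Bool :=
  if samples.length < 2 then
    List.replicate length.toNat false
  else
    ((samples.zip (samples.drop 1)).map (fun p =>
        (PySem.List.pyRange 0 length 1).map (fun i =>
          decide (PySem.List.pyGetD p.1.toList i ' '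
                    = PySem.List.pyGetD p.2.toList i ' ')))).foldl
      (fun out pm => (out.zip pm).map (fun q => q.1 && q.2))
      (List.replicate length.toNat true)

-- ===== PRECONDITION & SPEC =====
-- Pre_ excludes the ragged inputs (≥ 2 samples, positive length, some sample shorter than
-- length): on those byte indexing raises IndexError unless value-dependent short-circuiting
-- happens to skip the short position first, so whether A returns depends on the byte values.
def Pre_build_byte_mask_py (samples : List String) (length : Int) : Prop :=
  samples.length < 2 ∨ length ≤ 0 ∨ ∀ s ∈ samples, length ≤ (s.toList.length : Int)
instance (samples : List String) (length : Int) : Decidable (Pre_build_byte_mask_py samples length) := by unfold Pre_build_byte_mask_py; infer_instance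

def pvWitness_build_byte_mask_py : List String × Int := (["ab", "ac"], 2)

def Spec_build_byte_mask_py (samples : List String) (length : Int) (out : List Bool) : Prop := out = build_byte_mask_py_alt samples length
instance (samples : List String) (length : Int) (out : List Bool) : Decidable (Spec_build_byte_mask_py samples length out) := by unfold Spec_build_byte_mask_py; infer_instance

-- ===== CLAIM (what is proved, stated in full; the proofs are below) =====
def Claim_equal_build_byte_mask_py : Prop := ∀ (samples : List String) (length : Int), Dom_build_byte_mask_py samples length → Pre_build_byte_mask_py samples length → Spec_build_byte_mask_py samples length (build_byte_mask_py samples length)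

-- ===== LEMMAS AND PROOFS =====

theorem pv_foldl_const {α β : Type} (l : List α) (m : β) :
    l.foldl (fun acc _ => acc) m = m := by
  induction l with
  | nil => rfl
  | cons x t ih => exact ih

theorem pv_len (Q : Int → Prop) [DecidablePred Q] (l : List Int) :
    ∀ (m : List Bool),
      (l.foldl (fun m i =>
        if PySem.List.pyGetD m i false = true ∧ Q i
        then PySem.List.pySetD m i false else m) m).length = m.length := by
  induction l with
  | nil => intro m; rfl
  | cons k t ih =>
    intro m
    simp only [List.foldl_cons, ih]
    split <;> simp [PySem.List.length_pySetD]

theorem pv_inner (Q : Int → Prop) [DecidablePred Q] :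
    ∀ (n : Nat) (m : List Bool) (j : Nat),
      ((PySem.List.pyRange 0 (n : Int) 1).foldl (fun m i =>
          if PySem.List.pyGetD m i false = true ∧ Q i
          then PySem.List.pySetD m i false else m) m)[j]? =
        if j < n then m[j]?.map (fun b => b && !(decide (Q (j : Int)))) else m[j]? := by
  intro n
  induction n with
  | zero =>
    intro m j
    rw [PySem.List.pyRange_one_eq_nil (by omega)]
    simp
  | succ n ih =>
    intro m j
    have hcast : ((n + 1 : Nat) : Int) = (n : Int) + 1 := by push_cast; ring
    rw [hcast, PySem.List.pyRange_one_succ_right (by positivity), List.foldl_append]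
    set step := fun (m : List Bool) (i : Int) =>
      if PySem.List.pyGetD m i false = true ∧ Q i
      then PySem.List.pySetD m i false else m with hstep
    set F := (PySem.List.pyRange 0 (n : Int) 1).foldl step m with hF
    have hFj : ∀ j' : Nat, F[j']? =
        if j' < n then m[j']?.map (fun b => b && !(decide (Q (j' : Int)))) else m[j']? := ih m
    have hFn : F[n]? = m[n]? := by rw [hFj n]; simp
    have hlen : F.length = m.length := pv_len Q _ m
    simp only [List.foldl_cons, List.foldl_nil, hstep]
    rw [PySem.List.pyGetD_natCast, PySem.List.pySetD_natCast]
    by_cases hc : F.getD n false = true ∧ Q (n : Int)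
    · rw [if_pos hc]
      have hgd : F.getD n false = true := hc.1
      rw [List.getD_eq_getElem?_getD, hFn] at hgd
      have hmn : m[n]? = some true := by
        cases h : m[n]? with
        | none => rw [h] at hgd; simp at hgd
        | some b => rw [h] at hgd; simp at hgd; rw [hgd]
      have hnlt : n < m.length := (List.getElem?_eq_some_iff.mp hmn).1
      rw [List.getElem?_set]
      by_cases hj : j = n
      · subst hj
        rw [if_pos rfl, if_pos (by omega : j < j + 1), hmn]
        simp [hc.2, hlen, hnlt]
      · rw [if_neg (fun h => hj h.symm), hFj j]
        by_cases hj2 : j < n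
        · rw [if_pos hj2, if_pos (by omega)]
        · rw [if_neg hj2, if_neg (by omega)]
    · rw [if_neg hc, hFj j]
      by_cases hj : j = n
      · subst hj
        rw [if_neg (by omega : ¬ j < j), if_pos (by omega : j < j + 1)]
        cases h : m[j]? with
        | none => simp
        | some b =>
          have hgd : F.getD j false = b := by
            rw [List.getD_eq_getElem?_getD, hFn, h]; rfl
          cases b with
          | false => simp
          | true =>
            have hQ : ¬ Q (j : Int) := fun hq => hc ⟨by rw [hgd], hq⟩
            simp [hQ]
      · by_cases hj2 : j < n
        · rw [if_pos hj2, if_pos (by omega)]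
        · rw [if_neg hj2, if_neg (by omega)]

theorem pv_outer (c : List Char) (n : Nat) :
    ∀ (rest : List String) (m : List Bool) (j : Nat),
      (rest.foldl (fun mask s =>
          (PySem.List.pyRange 0 (n : Int) 1).foldl (fun m i =>
            if PySem.List.pyGetD m i false = true
                ∧ ¬ (PySem.List.pyGetD s.toList i ' ' = PySem.List.pyGetD c i ' ')
            then PySem.List.pySetD m i false else m) mask) m)[j]? =
        if j < n then
          m[j]?.map (fun b => b && rest.all (fun s =>
            decide (PySem.List.pyGetD s.toList (j : Int) ' ' = PySem.List.pyGetD c (j : Int) ' ')))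
        else m[j]? := by
  intro rest
  induction rest with
  | nil =>
    intro m j
    simp only [List.foldl_nil, List.all_nil, Bool.and_true]
    split
    · cases m[j]? <;> rfl
    · rfl
  | cons s t ih =>
    intro m j
    simp only [List.foldl_cons]
    rw [ih]
    rw [pv_inner (fun i => ¬ (PySem.List.pyGetD s.toList i ' ' = PySem.List.pyGetD c i ' ')) n m j]
    by_cases hj : j < n
    · rw [if_pos hj, if_pos hj, if_pos hj]
      cases m[j]? with
      | none => rfl
      | some b =>
        simp only [Option.map_some, List.all_cons]
        congr 1
        rw [Bool.and_assoc]
        congr 1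
        simp
    · rw [if_neg hj, if_neg hj, if_neg hj]

-- B's fold of elementwise-AND combination, read off at one index.
theorem pv_foldB (j : Nat) :
    ∀ (ms : List (List Bool)) (out : List Bool),
      (∀ pm ∈ ms, pm.length = out.length) →
      (ms.foldl (fun o p => (o.zip p).map (fun q => q.1 && q.2)) out)[j]? =
        out[j]?.map (fun x => x && ms.all (fun pm => pm.getD j false)) := by
  intro ms
  induction ms with
  | nil =>
    intro out _
    simp only [List.foldl_nil, List.all_nil, Bool.and_true]
    cases out[j]? <;> rfl
  | cons pm t ih =>
    intro out h
    have hpm : pm.length = out.length := h pm (by simp)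
    simp only [List.foldl_cons]
    have hlen' : ((out.zip pm).map (fun q : Bool × Bool => q.1 && q.2)).length = out.length := by
      simp [hpm]
    rw [ih _ (by intro p hp; rw [hlen']; exact h p (by simp [hp]))]
    by_cases hj : j < out.length
    · have hzj : (out.zip pm)[j]? = some (out[j], pm[j]) := by
        rw [List.getElem?_eq_getElem (by simp [hpm]; omega)]
        simp
      rw [List.getElem?_map, hzj, List.getElem?_eq_getElem hj]
      have hgd : pm[j]? = some pm[j] := List.getElem?_eq_getElem (by omega)
      simp [List.getD_eq_getElem?_getD, hgd, Bool.and_assoc]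
    · have h1 : (out.zip pm)[j]? = none := List.getElem?_eq_none (by simp [hpm]; omega)
      have h2 : out[j]? = none := List.getElem?_eq_none (by omega)
      rw [List.getElem?_map, h1, h2]
      rfl

-- Transitivity chain: all samples equal the first ⟺ all consecutive pairs equal.
theorem pv_chain {α : Type} [DecidableEq α] (f : String → α) :
    ∀ (t : List String) (r : String),
      t.all (fun s => decide (f s = f r)) =
      ((r :: t).zip t).all (fun p => decide (f p.1 = f p.2)) := by
  intro t
  induction t with
  | nil => intro r; rfl
  | cons x t' ih =>
    intro r
    simp only [List.zip_cons_cons, List.all_cons]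
    rw [← ih x]
    by_cases h : f x = f r
    · simp [h]
    · have h' : ¬ (f r = f x) := fun hh => h hh.symm
      simp [h, h']

theorem pv_all_map {A B : Type} (l : List A) (F : A → B) (g : B → Bool) (h : A → Bool)
    (hh : ∀ a, g (F a) = h a) : (l.map F).all g = l.all h := by
  induction l with
  | nil => rfl
  | cons x t ih => simp [ih, hh x]

-- ===== VERDICT (by name: the statement is the Claim_ definition above) =====
theorem build_byte_mask_py_spec : Claim_equal_build_byte_mask_py := by
  intro samples length _ _
  unfold Spec_build_byte_mask_py build_byte_mask_py build_byte_mask_py_alt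
  by_cases hlt : samples.length < 2
  · rw [if_pos hlt, if_pos hlt]
  · rw [if_neg hlt, if_neg hlt]
    by_cases hle : length ≤ 0
    · rw [PySem.List.pyRange_one_eq_nil hle]
      have h0 : length.toNat = 0 := by omega
      rw [h0]
      simp only [List.foldl_nil, List.map_nil, List.replicate_zero]
      rw [pv_foldl_const]
      induction (samples.zip (samples.drop 1)).map
          (fun _ : String × String => ([] : List Bool)) with
      | nil => rfl
      | cons p t ih => simpa using ih
    · obtain ⟨n, rfl⟩ : ∃ n : Nat, length = (n : Int) :=
        ⟨length.toNat, (Int.toNat_of_nonneg (by omega)).symm⟩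
      rw [Int.toNat_natCast]
      cases samples with
      | nil => simp at hlt
      | cons r t =>
        have href : PySem.List.pyGetD (r :: t) 0 "" = r := by
          simp [PySem.List.pyGetD, PySem.List.pyGet?, PySem.List.pyIdx?]
        rw [href]
        apply List.ext_getElem?
        intro j
        simp only [List.drop_one, List.tail_cons]
        rw [pv_outer r.toList n t (List.replicate n true) j]
        rw [pv_foldB j _ _ (by
          intro pm hpm
          simp only [List.mem_map] at hpm
          obtain ⟨p, _, rfl⟩ := hpm
          simp [PySem.List.length_pyRange_one])]
        by_cases hj : j < n
        · rw [if_pos hj, List.getElem?_replicate, if_pos hj]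
          simp only [Option.map_some, Bool.true_and]
          congr 1
          have hpm : ∀ p : String × String,
              (((PySem.List.pyRange 0 (n : Int) 1).map (fun i =>
                decide (PySem.List.pyGetD p.1.toList i ' '
                          = PySem.List.pyGetD p.2.toList i ' '))).getD j false) =
              decide (PySem.List.pyGetD p.1.toList (j : Int) ' '
                        = PySem.List.pyGetD p.2.toList (j : Int) ' ') := by
            intro p
            rw [List.getD_eq_getElem?_getD, PySem.List.getElem?_map_pyRange_zero _ n j hj]
            rfl
          rw [pv_all_map ((r :: t).zip t) _ _ _ hpm]
          exact pv_chain (fun s => PySem.List.pyGetD s.toList (j : Int) ' ') t r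
        · rw [if_neg hj, List.getElem?_replicate, if_neg hj]
          rfl
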